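-- pv_equiv track=rewrite | github.com/JDPaiva1/aoc | 2015/11/CorporatePolicy.py | threeCharStraight
-- ===== SOURCE A (Python) =====
-- def threeCharStraight(string):
--     for i in range(len(string)-2):
--         first = string[i]
--         second = string[i+1]
--         third = string[i+2]
--         if ord(second) == ord(first) + 1 and ord(third) == ord(first) + 2:
--             return True
--     return False
-- ===== SOURCE B (Python) =====
-- def threeCharStraight(string):
--     # Pass 1: table of adjacent single-step increments.
--     incs = [ord(string[i + 1]) == ord(string[i]) + 1 for i in range(len(string) - 1)]
--     # Pass 2: scan the table for two consecutive increments.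
--     for i in range(len(incs) - 1):
--         if incs[i] and incs[i + 1]:
--             return True
--     return False
-- ===== Notes on version B (the rewrite author's own statement) =====
-- stated objective: alternative
-- what changed: Replaced the fused triple-comparison loop by a build-then-scan decomposition: first build a table of adjacent single-step increments, then scan that table for two consecutive True entries.
import Mathlib
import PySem

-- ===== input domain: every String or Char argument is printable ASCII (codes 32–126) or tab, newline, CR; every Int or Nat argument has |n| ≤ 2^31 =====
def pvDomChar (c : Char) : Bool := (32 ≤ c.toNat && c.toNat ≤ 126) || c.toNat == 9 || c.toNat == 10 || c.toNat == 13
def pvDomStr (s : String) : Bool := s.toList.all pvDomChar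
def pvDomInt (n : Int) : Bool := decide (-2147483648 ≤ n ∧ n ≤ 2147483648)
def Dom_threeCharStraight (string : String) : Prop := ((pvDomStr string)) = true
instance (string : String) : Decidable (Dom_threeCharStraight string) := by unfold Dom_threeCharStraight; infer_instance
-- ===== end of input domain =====

-- B rebuilds the check as a build-then-scan decomposition (increment table, then pair scan); same cost, no speed claim.

-- ===== PORT A =====
-- A's loop over i in range(len-2) comparing string[i], string[i+1], string[i+2];
-- all indices are in range, so the sliding-window recursion is the literal loop.
def threeCharStraightAux : List Char → Bool
  | a :: b :: c :: rest =>
      if b.toNat == a.toNat + 1 && c.toNat == a.toNat + 2 then true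
      else threeCharStraightAux (b :: c :: rest)
  | _ => false

def threeCharStraight (string : String) : Bool :=
  threeCharStraightAux string.toList

-- ===== PORT B =====
-- pass 1 of Source B: incs[i] = (ord(string[i+1]) == ord(string[i]) + 1)
def incsTable : List Char → List Bool
  | a :: b :: rest => (b.toNat == a.toNat + 1) :: incsTable (b :: rest)
  | _ => []

-- pass 2 of Source B: scan the table for two consecutive True entries
def scanPairs : List Bool → Bool
  | x :: y :: rest => if x && y then true else scanPairs (y :: rest)
  | _ => false

def threeCharStraight_alt (string : String) : Bool :=
  scanPairs (incsTable string.toList)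

-- ===== PRECONDITION & SPEC =====
def Spec_threeCharStraight (string : String) (out : Bool) : Prop := out = threeCharStraight_alt string
instance (string : String) (out : Bool) : Decidable (Spec_threeCharStraight string out) := by unfold Spec_threeCharStraight; infer_instance

-- ===== CLAIM (what is proved, stated in full; the proofs are below) =====
def Claim_equal_threeCharStraight : Prop := ∀ (string : String), Dom_threeCharStraight string → Spec_threeCharStraight string (threeCharStraight string)

-- ===== LEMMAS AND PROOFS =====
theorem aux_eq_scan (l : List Char) : threeCharStraightAux l = scanPairs (incsTable l) := by
  induction l with
  | nil => rfl
  | cons a tl ih =>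
    match tl, ih with
    | [], _ => rfl
    | [b], _ => rfl
    | b :: c :: rest, ih =>
      simp only [threeCharStraightAux, incsTable, scanPairs] at *
      by_cases hb : b.toNat = a.toNat + 1
      · by_cases hc : c.toNat = a.toNat + 2
        · simp [hb, hc]
        · simp [hb, hc, ih]
      · simp [hb, ih]

-- ===== VERDICT (by name: the statement is the Claim_ definition above) =====
theorem threeCharStraight_spec : Claim_equal_threeCharStraight := by
  intro s _
  unfold Spec_threeCharStraight threeCharStraight threeCharStraight_alt
  exact aux_eq_scan s.toList
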